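-- pv_equiv track=rewrite | github.com/Andyfer004/P2-SO | src/scheduling.py | _blocks_from_timeline
-- ===== SOURCE A (Python) =====
-- def _blocks_from_timeline(tl):
--     blocks, cur = [], None
--     for ev in tl:
--         if cur and ev['pid'] == cur['pid'] and ev['time'] == cur['end']:
--             cur['end'] += 1
--         else:
--             if cur:
--                 blocks.append(cur)
--             cur = {'pid': ev['pid'], 'start': ev['time'], 'end': ev['time'] + 1}
--     if cur:
--         blocks.append(cur)
--
--     return [{'pid': b['pid'], 'start': b['start'], 'duration': b['end'] - b['start']}
--             for b in blocks if b['pid'] is not None]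
-- ===== SOURCE B (Python) =====
-- def _blocks_from_timeline(tl):
--     # Index-based two-pointer scan: the outer loop jumps from run start to run
--     # start; the inner pointer j advances while tl[j] continues the run anchored
--     # at tl[i] (same pid, time == tl[i]['time'] + (j - i)); each block is emitted
--     # immediately, dropping idle (pid None) runs.
--     out = []
--     n = len(tl)
--     i = 0
--     while i < n:
--         j = i + 1
--         while j < n and tl[j]['pid'] == tl[i]['pid'] and tl[j]['time'] == tl[i]['time'] + (j - i):
--             j += 1
--         if tl[i]['pid'] is not None:
--             out.append({'pid': tl[i]['pid'], 'start': tl[i]['time'], 'duration': j - i})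
--         i = j
--     return out
-- ===== Notes on version B (the rewrite author's own statement) =====
-- stated objective: alternative
-- what changed: Replaces A's element-by-element state machine that mutates a current-block record with an index-based two-pointer scan: the outer loop jumps from run start to run start, an inner pointer advances while tl[j] continues the run anchored at tl[i] (time == tl[i]['time'] + (j - i)), and each block is emitted immediately with duration j - i; no block list of open/closed records is maintained.
import Mathlib
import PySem

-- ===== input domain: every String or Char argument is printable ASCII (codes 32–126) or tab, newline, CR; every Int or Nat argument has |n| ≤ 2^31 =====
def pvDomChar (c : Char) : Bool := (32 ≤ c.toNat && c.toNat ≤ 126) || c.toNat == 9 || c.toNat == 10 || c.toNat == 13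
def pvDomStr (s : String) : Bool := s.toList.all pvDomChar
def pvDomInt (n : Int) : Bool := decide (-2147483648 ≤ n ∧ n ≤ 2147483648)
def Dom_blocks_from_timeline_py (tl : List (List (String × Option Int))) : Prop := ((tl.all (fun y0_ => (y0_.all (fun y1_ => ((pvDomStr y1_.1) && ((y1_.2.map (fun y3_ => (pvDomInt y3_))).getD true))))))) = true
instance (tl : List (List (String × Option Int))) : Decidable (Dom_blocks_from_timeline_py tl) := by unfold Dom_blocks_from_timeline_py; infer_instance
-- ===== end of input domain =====

-- B replaces A's mutable current-block state machine by an index-based two-pointer scan (outer loop jumps run to run, inner pointer finds each run's end); same O(n) cost.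


-- shared event accessors: ev['pid'] and ev['time'] (defaults unreachable under Pre_)
def pvPid (ev : List (String × Option Int)) : Option Int := (PySem.Dict.get? (PySem.Dict.mk ev) "pid").getD none
def pvTime (ev : List (String × Option Int)) : Int := ((PySem.Dict.get? (PySem.Dict.mk ev) "time").getD none).getD 0

-- ===== PORT A =====
-- the for-loop of A, state = (blocks, cur) with cur = (pid, start, end)
def pvALoop (blocks : List (Option Int × Int × Int)) (cur : Option (Option Int × Int × Int)) :
    List (List (String × Option Int)) → List (Option Int × Int × Int)
  | [] =>
    match cur with
    | some c => blocks ++ [c]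
    | none => blocks
  | ev :: rest =>
    match cur with
    | some (cp, cs, ce) =>
      if pvPid ev = cp ∧ pvTime ev = ce then
        pvALoop blocks (some (cp, cs, ce + 1)) rest
      else
        pvALoop (blocks ++ [(cp, cs, ce)]) (some (pvPid ev, pvTime ev, pvTime ev + 1)) rest
    | none => pvALoop blocks (some (pvPid ev, pvTime ev, pvTime ev + 1)) rest

-- final comprehension of A
def pvAFin (b : Option Int × Int × Int) : Option (List (String × Int)) :=
  match b with
  | (some p, s, e) => some [("pid", p), ("start", s), ("duration", e - s)]
  | (none, _, _) => none

def blocks_from_timeline_py (tl : List (List (String × Option Int))) : List (List (String × Int)) :=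
  (pvALoop [] none tl).filterMap pvAFin

-- ===== PORT B =====
-- inner while loop of B: advance j while tl[j] continues the run anchored at index i
-- (fuel makes the recursion structural; with fuel ≥ the remaining length it never runs out)
def pvInner (tl : List (List (String × Option Int))) (p0 : Option Int) (t0 : Int) (i : Nat) :
    Nat → Nat → Nat
  | 0, j => j
  | fuel + 1, j =>
    match tl[j]? with
    | some ev =>
      if pvPid ev = p0 ∧ pvTime ev = t0 + ((j : Int) - (i : Int)) then
        pvInner tl p0 t0 i fuel (j + 1)
      else j
    | none => j

-- outer while loop of B, accumulator out (fuel ≥ remaining iterations + 1)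
def pvOuter (tl : List (List (String × Option Int))) :
    Nat → List (List (String × Int)) → Nat → List (List (String × Int))
  | 0, out, _ => out
  | fuel + 1, out, i =>
    match tl[i]? with
    | none => out
    | some ev =>
      let j := pvInner tl (pvPid ev) (pvTime ev) i tl.length (i + 1)
      pvOuter tl fuel
        (out ++ match pvPid ev with
          | some p => [[("pid", p), ("start", pvTime ev), ("duration", (j : Int) - (i : Int))]]
          | none => []) j

def blocks_from_timeline_py_alt (tl : List (List (String × Option Int))) : List (List (String × Int)) :=
  pvOuter tl (tl.length + 1) [] 0

-- ===== PRECONDITION & SPEC =====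
-- Pre_: every event dict has a 'pid' key and an integer (non-None) 'time' value; otherwise A raises KeyError/TypeError.
def Pre_blocks_from_timeline_py (tl : List (List (String × Option Int))) : Prop :=
  ∀ ev ∈ tl, (PySem.Dict.get? (PySem.Dict.mk ev) "pid").isSome ∧ ((PySem.Dict.get? (PySem.Dict.mk ev) "time").getD none).isSome
instance (tl : List (List (String × Option Int))) : Decidable (Pre_blocks_from_timeline_py tl) := by
  unfold Pre_blocks_from_timeline_py; infer_instance

def pvWitness_blocks_from_timeline_py : (List (List (String × Option Int))) :=
  [[("pid", some 1), ("time", some 0)]]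

def Spec_blocks_from_timeline_py (tl : List (List (String × Option Int))) (out : List (List (String × Int))) : Prop := out = blocks_from_timeline_py_alt tl
instance (tl : List (List (String × Option Int))) (out : List (List (String × Int))) : Decidable (Spec_blocks_from_timeline_py tl out) := by unfold Spec_blocks_from_timeline_py; infer_instance

-- ===== CLAIM (what is proved, stated in full; the proofs are below) =====
def Claim_equal_blocks_from_timeline_py : Prop := ∀ (tl : List (List (String × Option Int))), Dom_blocks_from_timeline_py tl → Pre_blocks_from_timeline_py tl → Spec_blocks_from_timeline_py tl (blocks_from_timeline_py tl)

-- ===== LEMMAS AND PROOFS =====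

-- length of the maximal run continuing pid p0 at expected time t
def pvRunLen (p0 : Option Int) (t : Int) : List (List (String × Option Int)) → Nat
  | [] => 0
  | ev :: rest => if pvPid ev = p0 ∧ pvTime ev = t then 1 + pvRunLen p0 (t + 1) rest else 0

theorem pvRunLen_le (p0 : Option Int) (t : Int) (l : List (List (String × Option Int))) :
    pvRunLen p0 t l ≤ l.length := by
  induction l generalizing t with
  | nil => simp [pvRunLen]
  | cons ev rest ih =>
    simp only [pvRunLen]
    split
    · have := ih (t + 1); simp; omega
    · simp

-- split the timeline into maximal runs, summarized as (pid, start, length)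
def pvChunks : List (List (String × Option Int)) → List (Option Int × Int × Nat)
  | [] => []
  | ev :: rest =>
    (pvPid ev, pvTime ev, pvRunLen (pvPid ev) (pvTime ev + 1) rest + 1)
      :: pvChunks (rest.drop (pvRunLen (pvPid ev) (pvTime ev + 1) rest))
termination_by l => l.length
decreasing_by
  have := pvRunLen_le (pvPid ev) (pvTime ev + 1) rest
  simp only [List.length_drop, List.length_cons]
  omega

theorem pvChunks_nil : pvChunks [] = [] := by unfold pvChunks; rfl

theorem pvChunks_cons (ev : List (String × Option Int)) (rest : List (List (String × Option Int))) :
    pvChunks (ev :: rest)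
      = (pvPid ev, pvTime ev, pvRunLen (pvPid ev) (pvTime ev + 1) rest + 1)
          :: pvChunks (rest.drop (pvRunLen (pvPid ev) (pvTime ev + 1) rest)) := by
  rw [pvChunks.eq_def]

def pvRawChunk (c : Option Int × Int × Nat) : Option Int × Int × Int :=
  (c.1, c.2.1, c.2.1 + (c.2.2 : Int))

def pvBFin (c : Option Int × Int × Nat) : Option (List (String × Int)) :=
  match c with
  | (some p, s, k) => some [("pid", p), ("start", s), ("duration", (k : Int))]
  | (none, _, _) => none

theorem pvALoop_chunks (l : List (List (String × Option Int)))
    (blocks : List (Option Int × Int × Int)) (p0 : Option Int) (s e : Int) :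
    pvALoop blocks (some (p0, s, e)) l
      = (blocks ++ [(p0, s, e + (pvRunLen p0 e l : Int))])
          ++ (pvChunks (l.drop (pvRunLen p0 e l))).map pvRawChunk := by
  induction l generalizing blocks p0 s e with
  | nil => simp [pvALoop, pvRunLen, pvChunks_nil]
  | cons ev rest ih =>
    simp only [pvALoop, pvRunLen]
    by_cases hc : pvPid ev = p0 ∧ pvTime ev = e
    · rw [if_pos hc, if_pos hc, ih]
      have h1 : e + (↑(1 + pvRunLen p0 (e + 1) rest) : Int) = e + 1 + ↑(pvRunLen p0 (e + 1) rest) := by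
        push_cast; ring
      have h2 : List.drop (1 + pvRunLen p0 (e + 1) rest) (ev :: rest)
          = List.drop (pvRunLen p0 (e + 1) rest) rest := by
        rw [Nat.add_comm]; rfl
      rw [h1, h2]
    · rw [if_neg hc, if_neg hc, ih]
      simp only [List.drop_zero, pvChunks_cons]
      have hraw : pvRawChunk (pvPid ev, pvTime ev, pvRunLen (pvPid ev) (pvTime ev + 1) rest + 1)
          = (pvPid ev, pvTime ev, pvTime ev + 1 + (pvRunLen (pvPid ev) (pvTime ev + 1) rest : Int)) := by
        simp only [pvRawChunk]; push_cast; ring_nf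
      simp only [List.map_cons, hraw]
      simp

theorem pvA_chunks (tl : List (List (String × Option Int))) :
    pvALoop [] none tl = (pvChunks tl).map pvRawChunk := by
  cases tl with
  | nil => simp [pvALoop, pvChunks_nil]
  | cons ev rest =>
    simp only [pvALoop]
    rw [pvALoop_chunks, pvChunks_cons]
    have h1 : pvTime ev + 1 + (pvRunLen (pvPid ev) (pvTime ev + 1) rest : Int)
        = pvTime ev + (↑(pvRunLen (pvPid ev) (pvTime ev + 1) rest + 1) : Int) := by push_cast; ring
    simp only [List.map_cons, pvRawChunk, List.nil_append]
    simp [h1]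

theorem pvDropCons (tl : List (List (String × Option Int))) (j : Nat)
    (ev : List (String × Option Int)) (h : tl[j]? = some ev) :
    tl.drop j = ev :: tl.drop (j + 1) := by
  have hlt : j < tl.length := (List.getElem?_eq_some_iff.mp h).1
  rw [List.drop_eq_getElem_cons hlt]
  simp [(List.getElem?_eq_some_iff.mp h).2]

theorem pvDropNilOf (tl : List (List (String × Option Int))) (j : Nat)
    (h : tl[j]? = none) : tl.drop j = [] := by
  apply List.drop_eq_nil_of_le
  by_contra hlt
  simp [List.getElem?_eq_getElem (by omega : j < tl.length)] at h

theorem pvInner_runLen (tl : List (List (String × Option Int))) (p0 : Option Int) (t0 : Int)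
    (i fuel j : Nat) (hf : tl.length ≤ j + fuel) :
    pvInner tl p0 t0 i fuel j = j + pvRunLen p0 (t0 + ((j : Int) - (i : Int))) (tl.drop j) := by
  induction fuel generalizing j with
  | zero =>
    have : tl.drop j = [] := List.drop_eq_nil_of_le (by omega)
    rw [this]; simp [pvInner, pvRunLen]
  | succ fuel ih =>
    simp only [pvInner]
    cases h : tl[j]? with
    | none =>
      rw [pvDropNilOf tl j h]
      simp [pvRunLen]
    | some ev =>
      dsimp only
      rw [pvDropCons tl j ev h]
      by_cases hc : pvPid ev = p0 ∧ pvTime ev = t0 + ((j : Int) - (i : Int))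
      · rw [if_pos hc, ih (j + 1) (by omega)]
        simp only [pvRunLen, if_pos hc]
        have : t0 + ((j : Int) - (i : Int)) + 1 = t0 + ((↑(j + 1) : Int) - (i : Int)) := by
          push_cast; ring
        rw [this]; omega
      · rw [if_neg hc]
        simp [pvRunLen, hc]

theorem pvOuter_chunks (tl : List (List (String × Option Int)))
    (fuel : Nat) (out : List (List (String × Int))) (i : Nat) (hf : tl.length < i + fuel) :
    pvOuter tl fuel out i = out ++ (pvChunks (tl.drop i)).filterMap pvBFin := by
  induction fuel generalizing out i with
  | zero =>
    have : tl.drop i = [] := List.drop_eq_nil_of_le (by omega)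
    rw [this]; simp [pvOuter, pvChunks_nil]
  | succ fuel ih =>
    simp only [pvOuter]
    cases h : tl[i]? with
    | none =>
      rw [pvDropNilOf tl i h]
      simp [pvChunks_nil]
    | some ev =>
      dsimp only
      have hi : i < tl.length := (List.getElem?_eq_some_iff.mp h).1
      set j := pvInner tl (pvPid ev) (pvTime ev) i tl.length (i + 1) with hjdef
      rw [pvDropCons tl i ev h, pvChunks_cons]
      have hj : j = i + 1 + pvRunLen (pvPid ev) (pvTime ev + 1) (tl.drop (i + 1)) := by
        have := pvInner_runLen tl (pvPid ev) (pvTime ev) i tl.length (i + 1) (by omega)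
        simpa [hjdef,
          show pvTime ev + ((↑(i + 1) : Int) - (i : Int)) = pvTime ev + 1 by push_cast; ring]
          using this
      have hk := pvRunLen_le (pvPid ev) (pvTime ev + 1) (tl.drop (i + 1))
      rw [ih _ j (by simp at hk; omega)]
      have hdrop : (tl.drop (i + 1)).drop (pvRunLen (pvPid ev) (pvTime ev + 1) (tl.drop (i + 1)))
        = tl.drop j := by
        rw [List.drop_drop]; congr 1; omega
      have hdur : (j : Int) - (i : Int)
          = (↑(pvRunLen (pvPid ev) (pvTime ev + 1) (tl.drop (i + 1)) + 1) : Int) := by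
        rw [hj]; push_cast; ring
      rw [List.filterMap_cons, hdrop]
      cases hp : pvPid ev with
      | none => simp [pvBFin]
      | some p => simp [pvBFin, hdur, hp]

theorem pvFin_raw (c : Option Int × Int × Nat) : pvAFin (pvRawChunk c) = pvBFin c := by
  obtain ⟨p, s, k⟩ := c
  cases p with
  | none => rfl
  | some q => simp [pvAFin, pvBFin, pvRawChunk]

-- ===== VERDICT (by name: the statement is the Claim_ definition above) =====
theorem blocks_from_timeline_py_spec : Claim_equal_blocks_from_timeline_py := by
  intro tl _ _
  unfold Spec_blocks_from_timeline_py blocks_from_timeline_py blocks_from_timeline_py_alt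
  rw [pvA_chunks, List.filterMap_map, pvOuter_chunks tl (tl.length + 1) [] 0 (by omega)]
  simp only [List.drop_zero, List.nil_append]
  exact List.filterMap_congr (fun c _ => pvFin_raw c)
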